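-- pv_equiv track=rewrite | github.com/Jaimerpb/Parcial22_23_Jaime_RodriguezdelPortilloBaillo | Pregunta2.py | imprimirrr
-- ===== SOURCE A (Python) =====
-- def imprimirrr(lista):
--     multiplos10 = []
--     for n in lista:
--         if n > 300:
--             break
--         if n % 10 == 0 and n < 200:
--             multiplos10.append(n)
--     return multiplos10
-- ===== SOURCE B (Python) =====
-- def imprimirrr(lista):
--     # Divide and conquer: recursively solve halves; a half reports whether it
--     # contains an element > 300 (the stop signal); the right half is only
--     # consulted when the left half did not stop.
--     def solve(seg):
--         if len(seg) == 0:
--             return [], False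
--         if len(seg) == 1:
--             n = seg[0]
--             if n > 300:
--                 return [], True
--             return ([n] if n % 10 == 0 and n < 200 else []), False
--         mid = len(seg) // 2
--         left, stopped = solve(seg[:mid])
--         if stopped:
--             return left, True
--         right, stopped = solve(seg[mid:])
--         return left + right, stopped
--     return solve(lista)[0]
-- ===== Notes on version B (the rewrite author's own statement) =====
-- stated objective: alternative
-- what changed: Replaces the linear scan with break by a divide-and-conquer recursion: each half returns its qualifying multiples together with a 'contains an element > 300' stop flag, and the right half is combined only when the left half did not stop.
import Mathlib
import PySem

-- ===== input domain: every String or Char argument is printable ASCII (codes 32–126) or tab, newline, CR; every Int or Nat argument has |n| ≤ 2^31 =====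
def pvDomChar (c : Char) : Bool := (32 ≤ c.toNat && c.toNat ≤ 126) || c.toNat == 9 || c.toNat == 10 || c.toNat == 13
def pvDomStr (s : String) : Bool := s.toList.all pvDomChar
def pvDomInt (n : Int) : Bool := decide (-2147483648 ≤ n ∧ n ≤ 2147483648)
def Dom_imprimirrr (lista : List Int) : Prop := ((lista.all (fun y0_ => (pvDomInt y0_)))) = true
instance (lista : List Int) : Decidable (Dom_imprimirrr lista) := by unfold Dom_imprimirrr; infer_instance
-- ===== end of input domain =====

-- B replaces A's single left-to-right loop with break by a divide-and-conquer
-- recursion over halves, each half reporting a "contains an element > 300" stop flag.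

-- ===== PORT A =====
-- literal port of A: loop with accumulator, break on n > 300
def imprimirrrLoop (rest : List Int) (acc : List Int) : List Int :=
  match rest with
  | [] => acc
  | n :: rest' =>
    if n > 300 then acc
    else if PySem.Int.mod n 10 = 0 ∧ n < 200 then imprimirrrLoop rest' (acc ++ [n])
    else imprimirrrLoop rest' acc

def imprimirrr (lista : List Int) : List Int := imprimirrrLoop lista []

-- ===== PORT B =====
-- port of Source B's solve: divide and conquer, (result, stopped) per segment
def imprimirrrSolve (seg : List Int) : List Int × Bool :=
  match seg with
  | [] => ([], false)
  | [n] =>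
    if n > 300 then ([], true)
    else if PySem.Int.mod n 10 = 0 ∧ n < 200 then ([n], false) else ([], false)
  | a :: b :: rest =>
    let l := a :: b :: rest
    let mid := l.length / 2
    let left := imprimirrrSolve (l.take mid)
    if left.2 then (left.1, true)
    else
      let right := imprimirrrSolve (l.drop mid)
      (left.1 ++ right.1, right.2)
termination_by seg.length
decreasing_by
  all_goals simp [List.length_take, List.length_drop]
  all_goals omega

def imprimirrr_alt (lista : List Int) : List Int := (imprimirrrSolve lista).1

-- ===== PRECONDITION & SPEC =====
def Spec_imprimirrr (lista : List Int) (out : List Int) : Prop := out = imprimirrr_alt lista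
instance (lista : List Int) (out : List Int) : Decidable (Spec_imprimirrr lista out) := by unfold Spec_imprimirrr; infer_instance

-- ===== CLAIM =====
def Claim_equal_imprimirrr : Prop := ∀ (lista : List Int), Dom_imprimirrr lista → Spec_imprimirrr lista (imprimirrr lista)

-- ===== LEMMAS AND PROOFS =====
-- abbreviations used only by the proofs
def pvKeep (n : Int) : Bool := PySem.Int.mod n 10 == 0 && decide (n < 200)
def pvOk (n : Int) : Bool := decide (n ≤ 300)

theorem takeWhile_append_all {l1 l2 : List Int} (h : l1.all pvOk = true) :
    (l1 ++ l2).takeWhile pvOk = l1 ++ l2.takeWhile pvOk := by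
  induction l1 with
  | nil => simp
  | cons a t ih =>
    simp only [List.all_cons, Bool.and_eq_true] at h
    simp [h.1, ih h.2]

theorem takeWhile_append_not_all {l1 l2 : List Int} (h : ¬ l1.all pvOk = true) :
    (l1 ++ l2).takeWhile pvOk = l1.takeWhile pvOk := by
  induction l1 with
  | nil => simp at h
  | cons a t ih =>
    by_cases ha : pvOk a = true
    · simp only [List.all_cons, ha, Bool.true_and] at h
      simp [ha, ih h]
    · simp [ha]

theorem pvKeep_true {n : Int} (h : PySem.Int.mod n 10 = 0 ∧ n < 200) : pvKeep n = true := by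
  have hd := (PySem.Int.mod_eq_zero_iff_dvd n 10).mp h.1
  simp [pvKeep, h.2, hd]

theorem pvKeep_false {n : Int} (h : ¬ (PySem.Int.mod n 10 = 0 ∧ n < 200)) : pvKeep n = false := by
  by_cases h1 : PySem.Int.mod n 10 = 0 <;> by_cases h2 : n < 200 <;> simp_all [pvKeep]

theorem solve_eq_aux : ∀ (k : Nat) (seg : List Int), seg.length ≤ k →
    imprimirrrSolve seg = ((seg.takeWhile pvOk).filter pvKeep, !seg.all pvOk) := by
  intro k
  induction k with
  | zero =>
    intro seg hlen
    have : seg = [] := List.length_eq_zero_iff.mp (Nat.le_zero.mp hlen)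
    subst this
    simp [imprimirrrSolve]
  | succ k ih =>
    intro seg hlen
    match seg with
    | [] => simp [imprimirrrSolve]
    | [n] =>
      by_cases h3 : n > 300
      · have hok : pvOk n = false := by simp [pvOk]; omega
        simp [imprimirrrSolve, h3, List.takeWhile, hok]
      · have hok : pvOk n = true := by simp [pvOk]; omega
        rw [imprimirrrSolve, if_neg h3]
        by_cases hk : PySem.Int.mod n 10 = 0 ∧ n < 200
        · rw [if_pos hk]
          simp [List.takeWhile, List.filter, hok, pvKeep_true hk]
        · rw [if_neg hk]
          simp [List.takeWhile, List.filter, hok, pvKeep_false hk]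
    | a :: b :: rest =>
      have hlen2 : rest.length + 2 ≤ k + 1 := by simpa using hlen
      have hTake := ih ((a :: b :: rest).take ((a :: b :: rest).length / 2))
        (by simp [List.length_take]; omega)
      have hDrop := ih ((a :: b :: rest).drop ((a :: b :: rest).length / 2))
        (by simp [List.length_drop]; omega)
      rw [imprimirrrSolve]
      simp only [hTake, hDrop]
      by_cases hall : ((a :: b :: rest).take ((a :: b :: rest).length / 2)).all pvOk = true
      · have hsplit := takeWhile_append_all
          (l2 := (a :: b :: rest).drop ((a :: b :: rest).length / 2)) hall
        rw [List.take_append_drop] at hsplit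
        have htw : ((a :: b :: rest).take ((a :: b :: rest).length / 2)).takeWhile pvOk
            = (a :: b :: rest).take ((a :: b :: rest).length / 2) :=
          List.takeWhile_eq_self_iff.mpr (by intro x hx; exact List.all_eq_true.mp hall x hx)
        have hallsplit : (a :: b :: rest).all pvOk
            = (((a :: b :: rest).take ((a :: b :: rest).length / 2)).all pvOk
               && ((a :: b :: rest).drop ((a :: b :: rest).length / 2)).all pvOk) := by
          rw [← List.all_append, List.take_append_drop]
        simp only [List.length_cons] at hsplit htw hallsplit hall ⊢
        simp [hall, hsplit, htw, hallsplit, List.filter_append]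
      · have hsplit := takeWhile_append_not_all
          (l2 := (a :: b :: rest).drop ((a :: b :: rest).length / 2)) hall
        rw [List.take_append_drop] at hsplit
        have hallfull : (a :: b :: rest).all pvOk = false := by
          rw [← List.take_append_drop ((a :: b :: rest).length / 2) (a :: b :: rest),
            List.all_append]
          simp_all
        simp only [List.length_cons] at hsplit hallfull hall ⊢
        simp [hall, hsplit, hallfull]

theorem solve_eq (seg : List Int) :
    imprimirrrSolve seg = ((seg.takeWhile pvOk).filter pvKeep, !seg.all pvOk) :=
  solve_eq_aux seg.length seg (le_refl _)

theorem imprimirrrLoop_eq (rest acc : List Int) :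
    imprimirrrLoop rest acc = acc ++ ((rest.takeWhile pvOk).filter pvKeep) := by
  induction rest generalizing acc with
  | nil => simp [imprimirrrLoop]
  | cons n rest' ih =>
    simp only [imprimirrrLoop]
    by_cases h : n > 300
    · simp [h, List.takeWhile, pvOk, show ¬ n ≤ 300 by omega]
    · have hle : n ≤ 300 := by omega
      rw [if_neg h]
      by_cases hm : PySem.Int.mod n 10 = 0 ∧ n < 200
      · rw [if_pos hm, ih]
        simp [List.takeWhile, show pvOk n = true by simp [pvOk]; omega, pvKeep_true hm]
      · rw [if_neg hm, ih]
        simp [List.takeWhile, show pvOk n = true by simp [pvOk]; omega, pvKeep_false hm]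

-- ===== VERDICT =====
theorem imprimirrr_spec : Claim_equal_imprimirrr := by
  intro lista _
  unfold Spec_imprimirrr imprimirrr imprimirrr_alt
  rw [solve_eq, imprimirrrLoop_eq]
  simp
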